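-- pv_equiv track=rewrite | github.com/JulioClasss/DAM1_ProgPython | factorial/factorial.py | factorial_str
-- ===== SOURCE A (Python) =====
-- def factorial_str(num: int):
--     if num == 0:
--         return "0! => 1"
--
--     cadena = str(num) + "!" + " => "
--     resultado = 1
--     for i in range(num, 0, -1):
--         cadena += str(i)
--         if i != 1:
--             cadena += " x "
--         else:
--             cadena += " = "
--         resultado *= i
--     return cadena + str(resultado)
-- ===== SOURCE B (Python) =====
-- import math
--
--
-- def factorial_str(num: int):
--     # Two separate passes: product via math.prod, listing via join.
--     if num <= 0:
--         return f"{num}! => 1"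
--     factors = " x ".join(str(i) for i in range(num, 0, -1))
--     resultado = math.prod(range(1, num + 1))
--     return f"{num}! => {factors} = {resultado}"
-- ===== Notes on version B (the rewrite author's own statement) =====
-- stated objective: idiomatic
-- what changed: Replaces the single fused loop that interleaves string building and multiplication with two independent passes: math.prod over an ascending range for the product and ' x '.join over the descending range for the listing, assembled with an f-string.
import Mathlib
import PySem

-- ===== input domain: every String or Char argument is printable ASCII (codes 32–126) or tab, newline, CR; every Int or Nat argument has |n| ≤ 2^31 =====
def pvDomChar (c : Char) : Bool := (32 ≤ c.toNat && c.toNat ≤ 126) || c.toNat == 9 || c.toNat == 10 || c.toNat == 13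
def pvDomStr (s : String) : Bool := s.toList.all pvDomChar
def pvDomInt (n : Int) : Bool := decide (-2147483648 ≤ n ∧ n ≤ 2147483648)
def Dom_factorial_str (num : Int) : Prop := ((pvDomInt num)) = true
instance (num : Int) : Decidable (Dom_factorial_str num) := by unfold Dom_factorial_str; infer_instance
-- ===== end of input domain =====

-- B splits A's fused build-string-and-multiply loop into two independent passes
-- (a product pass and a join of the factor listing); same values, idiomatic decomposition.

-- ===== PORT A =====
def factorial_str (num : Int) : String :=
  if num = 0 then "0! => 1"
  else
    let cadena := PySem.Int.toStr num ++ "!" ++ " => "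
    let st := (PySem.List.pyRange num 0 (-1)).foldl
      (fun (st : String × Int) i =>
        let c := st.1 ++ PySem.Int.toStr i
        let c := if i ≠ 1 then c ++ " x " else c ++ " = "
        (c, st.2 * i)) (cadena, 1)
    st.1 ++ PySem.Int.toStr st.2

-- ===== PORT B =====
def factorial_str_alt (num : Int) : String :=
  if num ≤ 0 then PySem.Int.toStr num ++ "! => 1"
  else
    let factors := PySem.Str.join " x " ((PySem.List.pyRange num 0 (-1)).map PySem.Int.toStr)
    let resultado := (PySem.List.pyRange 1 (num + 1)).foldl (· * ·) 1
    PySem.Int.toStr num ++ "! => " ++ factors ++ " = " ++ PySem.Int.toStr resultado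

-- ===== PRECONDITION & SPEC =====
def Spec_factorial_str (num : Int) (out : String) : Prop := out = factorial_str_alt num
instance (num : Int) (out : String) : Decidable (Spec_factorial_str num out) := by unfold Spec_factorial_str; infer_instance

-- ===== CLAIM (what is proved, stated in full; the proofs are below) =====
def Claim_equal_factorial_str : Prop := ∀ (num : Int), Dom_factorial_str num → Spec_factorial_str num (factorial_str num)

-- ===== LEMMAS AND PROOFS =====

-- A's loop step, extracted for the lemmas below.
def pvStep (st : String × Int) (i : Int) : String × Int :=
  let c := st.1 ++ PySem.Int.toStr i
  let c := if i ≠ 1 then c ++ " x " else c ++ " = "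
  (c, st.2 * i)

-- B's ascending product over range(1, num+1).
def pvAsc (num : Int) : Int := (PySem.List.pyRange 1 (num + 1)).foldl (· * ·) 1

lemma pvAsc_succ (k : Nat) : pvAsc ((k : Int) + 1) = pvAsc k * ((k : Int) + 1) := by
  unfold pvAsc
  rw [show ((k : Int) + 1 + 1) = ((k : Int) + 1) + 1 from rfl,
      PySem.List.pyRange_one_succ_right (by omega : (1 : Int) ≤ (k : Int) + 1)]
  simp

-- The core invariant of A's loop for positive num = k+1, with generalized accumulator.
lemma pvLoop (k : Nat) : ∀ (s : String) (r : Int),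
    (PySem.List.pyRange ((k : Int) + 1) 0 (-1)).foldl pvStep (s, r)
      = (s ++ PySem.Str.join " x " ((PySem.List.pyRange ((k : Int) + 1) 0 (-1)).map PySem.Int.toStr) ++ " = ",
         r * pvAsc ((k : Int) + 1)) := by
  induction k with
  | zero =>
    intro s r
    simp only [Nat.cast_zero, zero_add]
    rw [PySem.List.pyRange_neg_one_cons (by omega : (0:Int) < 1),
        PySem.List.pyRange_neg_one_eq_nil (by omega : (1:Int) - 1 ≤ 0)]
    simp only [List.foldl_cons, List.foldl_nil, List.map_cons, List.map_nil]
    rw [show pvStep (s, r) 1 = (s ++ PySem.Int.toStr 1 ++ " = ", r * 1) from rfl,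
        Prod.mk.injEq]
    refine ⟨?_, ?_⟩
    · apply String.toList_inj.mp
      simp [PySem.Str.toList_join, PySem.Chars.join_singleton]
    · rw [show pvAsc 1 = 1 from rfl]
  | succ n ih =>
    intro s r
    have hcons : PySem.List.pyRange ((↑(n + 1) : Int) + 1) 0 (-1)
        = ((↑(n + 1) : Int) + 1) :: PySem.List.pyRange ((n : Int) + 1) 0 (-1) := by
      rw [PySem.List.pyRange_neg_one_cons (by push_cast; omega : (0:Int) < (↑(n + 1) : Int) + 1)]
      congr 1
      push_cast; ring_nf
    rw [hcons]
    simp only [List.foldl_cons, List.map_cons]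
    have hne : ((↑(n + 1) : Int) + 1) ≠ 1 := by push_cast; omega
    rw [show pvStep (s, r) ((↑(n + 1) : Int) + 1)
        = (s ++ PySem.Int.toStr ((↑(n + 1) : Int) + 1) ++ " x ", r * ((↑(n + 1) : Int) + 1)) by
      simp only [pvStep, if_pos hne]]
    rw [ih]
    have hcons' : PySem.List.pyRange ((n : Int) + 1) 0 (-1)
        = ((n : Int) + 1) :: PySem.List.pyRange ((n : Int)) 0 (-1) := by
      rw [PySem.List.pyRange_neg_one_cons (by omega : (0:Int) < (n : Int) + 1)]
      congr 1; ring_nf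
    rw [Prod.mk.injEq]
    refine ⟨?_, ?_⟩
    · apply String.toList_inj.mp
      simp only [String.toList_append, PySem.Str.toList_join, List.map_map, hcons', List.map_cons,
        PySem.Chars.join_cons_cons]
      simp
    · rw [pvAsc_succ (n + 1)]
      push_cast
      ring

theorem factorial_str_spec : Claim_equal_factorial_str := by
  intro num _
  unfold Spec_factorial_str factorial_str factorial_str_alt
  rcases lt_trichotomy num 0 with hneg | hzero | hpos
  · rw [if_neg (by omega), if_pos (by omega : num ≤ 0),
        PySem.List.pyRange_neg_one_eq_nil (by omega : num ≤ 0)]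
    simp only [List.foldl_nil]
    apply String.toList_inj.mp
    simp [PySem.Int.toList_toStr]
    rfl
  · subst hzero
    decide
  · rw [if_neg (by omega), if_neg (by omega)]
    obtain ⟨k, hk⟩ : ∃ k : Nat, num = (k : Int) + 1 := ⟨(num - 1).toNat, by omega⟩
    subst hk
    have hfold := pvLoop k (PySem.Int.toStr ((k : Int) + 1) ++ "!" ++ " => ") 1
    simp only [show (fun (st : String × Int) i =>
        let c := st.1 ++ PySem.Int.toStr i
        let c := if i ≠ 1 then c ++ " x " else c ++ " = "
        (c, st.2 * i)) = pvStep from rfl]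
    rw [hfold]
    apply String.toList_inj.mp
    simp [PySem.Int.toList_toStr, pvAsc]
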